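-- pv_equiv track=rewrite | github.com/1LStopBudapest/Helper | Binning_BKVal.py | findCR2BinIndexVal2
-- ===== SOURCE A (Python) =====
-- CT_bin = [300, 400, -1]
--
-- MT_bin = [0, 60, 95, 130, -1]
--
-- def findCR2BinIndexVal2(CT, MT):
--     idx = -1
--     pickIdx = -1
--     for j in range(len(MT_bin)-1):
--         cut1 = MT>MT_bin[j] if j == len(MT_bin)-2 else MT>MT_bin[j] and MT<=MT_bin[j+1]
--         for i in range(len(CT_bin)-1):
--             cut2 = CT>CT_bin[i] if i == len(CT_bin)-2 else CT>CT_bin[i] and CT<=CT_bin[i+1]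
--             idx += 1
--             if (cut1 and cut2):
--                 pickIdx = idx
--                 break
--         else:
--             continue
--         break
--
--     return pickIdx
-- ===== SOURCE B (Python) =====
-- def findCR2BinIndexVal2(CT, MT):
--     if MT <= 0 or CT <= 300:
--         return -1
--     row = 0 if MT <= 60 else 1 if MT <= 95 else 2 if MT <= 130 else 3
--     col = 0 if CT <= 400 else 1
--     return row * 2 + col
-- ===== Notes on version B (the rewrite author's own statement) =====
-- stated objective: simpler
-- what changed: Replaced the nested loop with running idx counter and break/else-continue control flow by two independent interval classifications (MT row, CT column) combined as row*2+col.
import Mathlib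
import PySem

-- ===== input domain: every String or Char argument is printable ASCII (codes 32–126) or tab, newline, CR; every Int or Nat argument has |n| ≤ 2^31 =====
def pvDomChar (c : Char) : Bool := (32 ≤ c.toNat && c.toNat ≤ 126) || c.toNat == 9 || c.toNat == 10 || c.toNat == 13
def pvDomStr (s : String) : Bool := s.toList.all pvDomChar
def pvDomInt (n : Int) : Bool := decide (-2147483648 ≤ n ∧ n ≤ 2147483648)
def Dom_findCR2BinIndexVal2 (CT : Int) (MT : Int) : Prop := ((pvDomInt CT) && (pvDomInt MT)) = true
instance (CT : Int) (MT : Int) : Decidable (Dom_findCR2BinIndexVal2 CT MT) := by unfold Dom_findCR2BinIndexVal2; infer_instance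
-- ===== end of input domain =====

-- B replaces A's nested loop with idx counter and break/else-continue by two independent
-- interval classifications combined arithmetically (objective: simpler).
-- ===== PORT A =====
def CT_bin : List Int := [300, 400, -1]
def MT_bin : List Int := [0, 60, 95, 130, -1]

-- inner 'for i' loop of A; all list indices are in range, so getD is exact; returns (idx, pickIdx, broke)
def pvInner (CT : Int) (cut1 : Bool) (i : Nat) (idx pickIdx : Int) : Int × Int × Bool :=
  if i < CT_bin.length - 1 then
    let cut2 := if i = CT_bin.length - 2 then decide (CT > CT_bin.getD i 0)
      else decide (CT > CT_bin.getD i 0) && decide (CT ≤ CT_bin.getD (i+1) 0)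
    let idx' := idx + 1
    if cut1 && cut2 then (idx', idx', true)
    else pvInner CT cut1 (i+1) idx' pickIdx
  else (idx, pickIdx, false)
termination_by CT_bin.length - 1 - i

-- outer 'for j' loop of A (else: continue / break becomes the 'broke' flag)
def pvOuter (CT MT : Int) (j : Nat) (idx pickIdx : Int) : Int :=
  if j < MT_bin.length - 1 then
    let cut1 := if j = MT_bin.length - 2 then decide (MT > MT_bin.getD j 0)
      else decide (MT > MT_bin.getD j 0) && decide (MT ≤ MT_bin.getD (j+1) 0)
    let r := pvInner CT cut1 0 idx pickIdx
    if r.2.2 then r.2.1 else pvOuter CT MT (j+1) r.1 r.2.1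
  else pickIdx
termination_by MT_bin.length - 1 - j

def findCR2BinIndexVal2 (CT : Int) (MT : Int) : Int := pvOuter CT MT 0 (-1) (-1)

-- ===== PORT B =====
def findCR2BinIndexVal2_alt (CT : Int) (MT : Int) : Int :=
  if MT ≤ 0 ∨ CT ≤ 300 then -1
  else
    let row : Int := if MT ≤ 60 then 0 else if MT ≤ 95 then 1 else if MT ≤ 130 then 2 else 3
    let col : Int := if CT ≤ 400 then 0 else 1
    row * 2 + col

-- ===== PRECONDITION & SPEC =====
def Spec_findCR2BinIndexVal2 (CT : Int) (MT : Int) (out : Int) : Prop := out = findCR2BinIndexVal2_alt CT MT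
instance (CT : Int) (MT : Int) (out : Int) : Decidable (Spec_findCR2BinIndexVal2 CT MT out) := by unfold Spec_findCR2BinIndexVal2; infer_instance

-- ===== CLAIM (what is proved, stated in full; the proofs are below) =====
def Claim_equal_findCR2BinIndexVal2 : Prop := ∀ (CT : Int) (MT : Int), Dom_findCR2BinIndexVal2 CT MT → Spec_findCR2BinIndexVal2 CT MT (findCR2BinIndexVal2 CT MT)

-- ===== LEMMAS AND PROOFS =====

-- ===== VERDICT (by name: the statement is the Claim_ definition above) =====
-- one full pass of A's inner loop (i = 0, 1, then exit)
theorem pvInner_spec (CT : Int) (cut1 : Bool) (idx pick : Int) :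
    pvInner CT cut1 0 idx pick =
      if cut1 && decide (CT > 300) && decide (CT ≤ 400) then (idx+1, idx+1, true)
      else if cut1 && decide (CT > 400) then (idx+2, idx+2, true)
      else (idx+2, pick, false) := by
  rw [pvInner]; norm_num [CT_bin]
  rw [pvInner]; norm_num [CT_bin]
  rw [pvInner]; norm_num [CT_bin]
  split_ifs <;> simp_all <;> omega

set_option maxHeartbeats 1600000 in
theorem pvMain (CT MT : Int) : findCR2BinIndexVal2 CT MT = findCR2BinIndexVal2_alt CT MT := by
  unfold findCR2BinIndexVal2 findCR2BinIndexVal2_alt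
  rw [pvOuter]; norm_num [MT_bin, pvInner_spec]
  split_ifs <;> norm_num <;> try omega
  all_goals (first | omega | ((rw [pvOuter]; norm_num [MT_bin, pvInner_spec]) <;> (split_ifs <;> norm_num <;> try omega)))
  all_goals (first | omega | ((rw [pvOuter]; norm_num [MT_bin, pvInner_spec]) <;> (split_ifs <;> norm_num <;> try omega)))
  all_goals (first | omega | ((rw [pvOuter]; norm_num [MT_bin, pvInner_spec]) <;> (split_ifs <;> norm_num <;> try omega)))
  all_goals (first | (rw [pvOuter]; norm_num [MT_bin]) | simp_all)

theorem findCR2BinIndexVal2_spec : Claim_equal_findCR2BinIndexVal2 :=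
  fun CT MT _ => pvMain CT MT
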